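/- GENERATED by farm/mkstatement.py from design/units.tsv (unit `fill_buffer`) and the Specs of Toy/Spec/*.lean — do not edit.
   THE STATEMENT of the proof unit `fill_buffer`: the function `fill_buffer` (15 instructions) satisfies its contract,
   given the contracts of its callees. What the names mean: ProgX/Base/Spec/Basic.lean. The theorem to prove:
   `theorem fill_buffer_ok : Toy.Spec.fill_buffer.Statement`. -/
import ProgX.Base.Spec.Libc
import Toy.Code
import Toy.Dec.All
import Toy.Labels
import Toy.Spec.Toy
namespace Toy.Spec.fill_buffer
open X86 X86.User Asan

/-- The statement of unit `fill_buffer`. -/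
def Statement : Prop :=
  ∀ (Lay : Layout) (_hLay : Lay.hi = 0x1000000) (μ : Microarch) (_hμ : UserX.MicroOK μ) (u₀ : State)
    (_hcode : HasCodeNat Lay u₀ Toy.L.fill_buffer.entry Toy.Code.code_fill_buffer.nat Toy.L.fill_buffer.size)
    (_h_memcpy : ∀ (others : List Obj) (frames : List (Nat × FrameLayout)), Calls Lay μ ProgX.Base.WayInv (ProgX.Base.conv u₀) ProgX.Base.L.memcpy.entry (ProgX.Base.Spec.memcpy.spec others frames))
    (_h_memset : ∀ (others : List Obj) (frames : List (Nat × FrameLayout)), Calls Lay μ ProgX.Base.WayInv (ProgX.Base.conv u₀) ProgX.Base.L.memset.entry (ProgX.Base.Spec.memset.spec others frames)),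
    ∀ (others : List Obj) (frames : List (Nat × FrameLayout)), Calls Lay μ ProgX.Base.WayInv (ProgX.Base.conv u₀) Toy.L.fill_buffer.entry (Toy.Spec.fill_buffer.spec others frames)

end Toy.Spec.fill_buffer
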